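-- pv_equiv track=rewrite | github.com/LookParOff/Machine_Learning | Test.py | fromBinToDec
-- ===== SOURCE A (Python) =====
-- def fromBinToDec(a):
--     aList = []
--     for digit in str(a):
--         aList.append(int(digit))
--     aList = aList[::-1]
--     degree = 0
--     res = 0
--     for digit in aList:
--         res += digit * 2**degree
--         degree += 1
--     listRes = []
--     for digit in str(res):
--         listRes.append(int(digit))
--     return listRes
-- ===== SOURCE B (Python) =====
-- def fromBinToDec(a):
--     res = 0
--     for ch in str(a):
--         res = res * 2 + int(ch)
--     if res == 0:
--         return [0]
--     out = []
--     while res > 0: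
--         res, r = divmod(res, 10)
--         out = [r] + out
--     return out
-- ===== Notes on version B (the rewrite author's own statement) =====
-- stated objective: alternative
-- what changed: B replaces A's reverse-the-digit-list-and-sum-digit*2**k pass with a left-to-right Horner fold over str(a), and replaces A's str(res) round-trip for the output with explicit divmod(res,10) digit extraction building the result front-to-back, with a [0] guard for zero.
import Mathlib
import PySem

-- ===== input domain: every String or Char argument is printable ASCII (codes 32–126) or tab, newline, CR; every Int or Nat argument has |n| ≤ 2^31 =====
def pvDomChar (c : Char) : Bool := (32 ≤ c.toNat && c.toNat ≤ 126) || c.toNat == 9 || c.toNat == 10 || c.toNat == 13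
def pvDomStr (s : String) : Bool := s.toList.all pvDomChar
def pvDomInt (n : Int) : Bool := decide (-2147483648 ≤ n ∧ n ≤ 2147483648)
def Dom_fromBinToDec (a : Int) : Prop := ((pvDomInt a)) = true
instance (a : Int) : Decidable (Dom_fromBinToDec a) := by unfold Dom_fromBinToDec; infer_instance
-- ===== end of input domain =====

-- B computes the value by a Horner fold over str(a) and emits decimal digits by repeated
-- divmod instead of A's reversed power sum and str(res) round-trip (alternative decomposition).


-- ===== PORT A =====
-- int(digit) for a one-character string; exact via PySem.Int.ofStr? (default 0 never reached under Pre_)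
def pvDigit (c : Char) : Int := (PySem.Int.ofStr? (String.ofList [c])).getD 0

def fromBinToDec (a : Int) : List Int :=
  let aList := (PySem.Int.toChars a).foldl (fun l c => l ++ [pvDigit c]) []
  let aList := (PySem.List.slice? aList none none (-1)).getD []
  let st := aList.foldl (fun (p : Int × Int) d => (p.1 + d * 2 ^ p.2.toNat, p.2 + 1)) (0, 0)
  (PySem.Int.toChars st.1).foldl (fun l c => l ++ [pvDigit c]) []

-- ===== PORT B =====
-- the `while res > 0: res, r = divmod(res, 10); out = [r] + out` loop of Source B
def pvAltLoop (res : Int) (out : List Int) : List Int :=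
  if _h : 0 < res then
    pvAltLoop (PySem.Int.floordiv res 10) (PySem.Int.mod res 10 :: out)
  else out
termination_by res.toNat
decreasing_by
  simp only [PySem.Int.floordiv, Int.fdiv_eq_ediv]
  split <;> omega

def fromBinToDec_alt (a : Int) : List Int :=
  let res := (PySem.Int.toChars a).foldl (fun r c => r * 2 + pvDigit c) 0
  if res = 0 then [0] else pvAltLoop res []

-- ===== PRECONDITION & SPEC =====
-- Pre_ excludes exactly a < 0, where both A and B raise ValueError (int('-') on the sign character).
def Pre_fromBinToDec (a : Int) : Prop := 0 ≤ a
instance (a : Int) : Decidable (Pre_fromBinToDec a) := by unfold Pre_fromBinToDec; infer_instance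
def pvWitness_fromBinToDec : Int := 6

def Spec_fromBinToDec (a : Int) (out : List Int) : Prop := out = fromBinToDec_alt a
instance (a : Int) (out : List Int) : Decidable (Spec_fromBinToDec a out) := by unfold Spec_fromBinToDec; infer_instance

-- ===== CLAIM (what is proved, stated in full; the proofs are below) =====
def Claim_equal_fromBinToDec : Prop := ∀ (a : Int), Dom_fromBinToDec a → Pre_fromBinToDec a → Spec_fromBinToDec a (fromBinToDec a)

-- ===== LEMMAS AND PROOFS =====

-- decimal digit characters of n, most significant first (what Nat.toDigits 10 produces)
def pvCharDigs (n : Nat) : List Char :=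
  if _h : n < 10 then [Nat.digitChar n] else pvCharDigs (n / 10) ++ [Nat.digitChar (n % 10)]
decreasing_by omega

-- decimal digits of n as Ints, most significant first
def pvIntDigs (n : Nat) : List Int :=
  if _h : n < 10 then [(n : Int)] else pvIntDigs (n / 10) ++ [((n % 10 : Nat) : Int)]
decreasing_by omega

theorem pvDigit_digitChar (d : Nat) (h : d < 10) : pvDigit (Nat.digitChar d) = d := by
  interval_cases d <;> decide

theorem pv_toDigitsCore_eq (f : Nat) : ∀ n acc, n < f →
    Nat.toDigitsCore 10 f n acc = pvCharDigs n ++ acc := by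
  induction f with
  | zero => intro n acc h; omega
  | succ f ih =>
    intro n acc h
    rw [Nat.toDigitsCore]
    by_cases h10 : n < 10
    · have : n / 10 = 0 := by omega
      rw [if_pos this, pvCharDigs, dif_pos h10]
      have : n % 10 = n := by omega
      simp [this]
    · have hne : n / 10 ≠ 0 := by omega
      rw [if_neg hne, ih (n / 10) _ (by omega)]
      conv_rhs => rw [pvCharDigs]
      rw [dif_neg h10]
      simp

theorem pv_toChars_eq (m : Int) (h : 0 ≤ m) :
    PySem.Int.toChars m = pvCharDigs m.toNat := by
  rw [PySem.Int.toChars, if_neg (by omega), Nat.toDigits,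
    pv_toDigitsCore_eq (m.toNat + 1) m.toNat [] (by omega), List.append_nil]

theorem pv_map_charDigs (n : Nat) : (pvCharDigs n).map pvDigit = pvIntDigs n := by
  induction n using Nat.strong_induction_on with
  | _ n ih =>
    by_cases h : n < 10
    · rw [pvCharDigs, dif_pos h, pvIntDigs, dif_pos h]
      simp [pvDigit_digitChar n h]
    · rw [pvCharDigs, dif_neg h, pvIntDigs, dif_neg h, List.map_append,
        ih (n / 10) (by omega)]
      simp [pvDigit_digitChar (n % 10) (by omega)]

theorem pv_foldl_append (l : List Char) : ∀ acc : List Int,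
    l.foldl (fun l c => l ++ [pvDigit c]) acc = acc ++ l.map pvDigit := by
  induction l with
  | nil => simp
  | cons c l ih => intro acc; simp [ih]

theorem pv_horner_gen (l : List Int) : ∀ r : Int,
    l.foldl (fun r d => r * 2 + d) r =
      r * 2 ^ l.length + l.foldl (fun r d => r * 2 + d) 0 := by
  induction l with
  | nil => simp
  | cons x l ih =>
    intro r
    simp only [List.foldl_cons, List.length_cons]
    rw [ih (r * 2 + x), ih (0 * 2 + x)]
    ring

theorem pv_phase1 (l : List Int) :
    l.reverse.foldl (fun (p : Int × Int) d => (p.1 + d * 2 ^ p.2.toNat, p.2 + 1)) (0, 0) =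
      (l.foldl (fun r d => r * 2 + d) 0, (l.length : Int)) := by
  induction l with
  | nil => simp
  | cons x l ih =>
    simp only [List.reverse_cons, List.foldl_append, ih, List.foldl_cons, List.foldl_nil,
      List.length_cons]
    rw [pv_horner_gen l (0 * 2 + x)]
    simp only [Int.toNat_natCast, Prod.mk.injEq]
    constructor
    · ring
    · push_cast; ring

theorem pv_horner_nonneg (l : List Int) (hl : ∀ x ∈ l, 0 ≤ x) : ∀ r : Int, 0 ≤ r →
    0 ≤ l.foldl (fun r d => r * 2 + d) r := by
  induction l with
  | nil => intro r hr; simpa using hr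
  | cons x l ih =>
    intro r hr
    simp only [List.foldl_cons]
    exact ih (fun y hy => hl y (List.mem_cons_of_mem x hy)) _
      (by have := hl x List.mem_cons_self; omega)

theorem pv_mem_intDigs (n : Nat) : ∀ x ∈ pvIntDigs n, 0 ≤ x := by
  induction n using Nat.strong_induction_on with
  | _ n ih =>
    by_cases h : n < 10
    · rw [pvIntDigs, dif_pos h]; simp
    · rw [pvIntDigs, dif_neg h]
      intro x hx
      rcases List.mem_append.1 hx with hx | hx
      · exact ih (n / 10) (by omega) x hx
      · simp at hx; omega

theorem pv_altLoop_eq (n : Nat) : 0 < n → ∀ acc,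
    pvAltLoop (n : Int) acc = pvIntDigs n ++ acc := by
  induction n using Nat.strong_induction_on with
  | _ n ih =>
    intro hn acc
    rw [pvAltLoop.eq_def, dif_pos (by exact_mod_cast hn)]
    have hd : PySem.Int.floordiv (n : Int) 10 = ((n / 10 : Nat) : Int) := by
      simp [PySem.Int.floordiv, Int.fdiv_eq_ediv]
    have hm : PySem.Int.mod (n : Int) 10 = ((n % 10 : Nat) : Int) := by
      simp [PySem.Int.mod, Int.fmod_eq_emod]
    rw [hd, hm]
    by_cases h : n < 10
    · have h0 : n / 10 = 0 := by omega
      rw [h0]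
      rw [pvAltLoop.eq_def, dif_neg (by norm_num)]
      rw [pvIntDigs, dif_pos h]
      have : n % 10 = n := by omega
      simp [this]
    · rw [ih (n / 10) (by omega) (by omega)]
      conv_rhs => rw [pvIntDigs]
      rw [dif_neg h]
      simp

-- ===== VERDICT (by name: the statement is the Claim_ definition above) =====
theorem fromBinToDec_spec : Claim_equal_fromBinToDec := by
  intro a _ hpre
  unfold Spec_fromBinToDec fromBinToDec fromBinToDec_alt
  simp only [PySem.List.slice?_none_none_neg_one, Option.getD_some]
  have hmapfold : ∀ n : Nat,
      (pvCharDigs n).foldl (fun l c => l ++ [pvDigit c]) ([] : List Int) = pvIntDigs n := by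
    intro n; rw [pv_foldl_append, List.nil_append, pv_map_charDigs]
  have hHfold : ∀ (l : List Char) (r : Int),
      l.foldl (fun r c => r * 2 + pvDigit c) r = (l.map pvDigit).foldl (fun r d => r * 2 + d) r := by
    intro l
    induction l with
    | nil => intro r; rfl
    | cons c l ih => intro r; simp [ih]
  rw [pv_toChars_eq a hpre, hmapfold, pv_phase1 (pvIntDigs a.toNat), hHfold, pv_map_charDigs]
  set R : Int := (pvIntDigs a.toNat).foldl (fun r d => r * 2 + d) 0 with hR
  have hRnn : 0 ≤ R := pv_horner_nonneg _ (pv_mem_intDigs a.toNat) 0 le_rfl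
  by_cases h0 : R = 0
  · rw [if_pos h0]
    simp only [h0]
    rw [pv_toChars_eq 0 le_rfl, pv_foldl_append, List.nil_append, pv_map_charDigs]
    rw [pvIntDigs]
    norm_num
  · rw [if_neg h0]
    rw [pv_toChars_eq R hRnn, pv_foldl_append, List.nil_append, pv_map_charDigs]
    have hcast : ((R.toNat : Nat) : Int) = R := Int.toNat_of_nonneg hRnn
    rw [← hcast, pv_altLoop_eq R.toNat (by omega) [], List.append_nil, Int.toNat_natCast]
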